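-- pv_equiv track=rewrite | github.com/dsunday/Refltools | kk_stoichiometry_fit.py | _combine_fragments
-- ===== SOURCE A (Python) =====
-- def _combine_fragments(fragments, counts):
--     """
--     Combine a list of fragment formula dicts scaled by their integer counts
--     into a single flat formula string.
--
--     Parameters
--     ----------
--     fragments : list of dict   [{element: count}, ...]  one per fragment
--     counts    : list of int    multiplier for each fragment
--
--     Returns
--     -------
--     str   e.g. 'Sn10C16H16O10'
--     """
--     combined = {}
--     for frag_dict, n in zip(fragments, counts):
--         for element, c in frag_dict.items():
--             combined[element] = combined.get(element, 0) + c * n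
--     # Canonical order: C first, H second, then alphabetical (Hill convention)
--     order = sorted(combined.keys(),
--                    key=lambda e: (0 if e == 'C' else 1 if e == 'H' else 2, e))
--     return ''.join(f"{e}{combined[e]}" for e in order if combined[e] > 0)
-- ===== SOURCE B (Python) =====
-- def _combine_fragments(fragments, counts):
--     """Dict-free staged version: gather the distinct elements, then emit the C
--     piece, the H piece and the remaining elements alphabetically, computing each
--     element's total by summing its contributions across all fragments on demand."""
--     elements = set()
--     for frag, _n in zip(fragments, counts):
--         elements.update(frag)
--
--     def total(e):
--         return sum(frag.get(e, 0) * n for frag, n in zip(fragments, counts))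
--
--     pieces = []
--     for e in ('C', 'H'):
--         if total(e) > 0:
--             pieces.append(f"{e}{total(e)}")
--     for e in sorted(elements - {'C', 'H'}):
--         if total(e) > 0:
--             pieces.append(f"{e}{total(e)}")
--     return ''.join(pieces)
-- ===== Notes on version B (the rewrite author's own statement) =====
-- stated objective: alternative
-- what changed: B drops A's incrementally-updated dict accumulator entirely: it collects the distinct element set, computes each element's total by an on-demand scan over all fragments, and emits the C piece, the H piece, then the remaining elements in plain alphabetical order instead of one composite-key sort of dict keys.
import Mathlib
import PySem

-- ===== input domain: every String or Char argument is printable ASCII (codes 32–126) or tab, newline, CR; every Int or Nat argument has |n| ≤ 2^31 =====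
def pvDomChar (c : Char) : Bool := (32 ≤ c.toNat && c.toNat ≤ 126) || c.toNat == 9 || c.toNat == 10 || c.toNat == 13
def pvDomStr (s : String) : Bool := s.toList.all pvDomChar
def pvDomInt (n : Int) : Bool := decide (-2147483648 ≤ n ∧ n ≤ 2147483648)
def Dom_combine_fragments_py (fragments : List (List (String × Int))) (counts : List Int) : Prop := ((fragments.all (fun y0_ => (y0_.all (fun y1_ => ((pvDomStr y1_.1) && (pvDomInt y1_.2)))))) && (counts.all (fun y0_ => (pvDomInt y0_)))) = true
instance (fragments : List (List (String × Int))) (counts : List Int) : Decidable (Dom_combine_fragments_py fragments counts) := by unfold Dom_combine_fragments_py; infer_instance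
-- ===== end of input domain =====

-- B drops A's dict accumulator: it gathers the distinct element set, computes each element's total by
-- an on-demand scan over all fragments, and emits C, then H, then the rest alphabetically
-- (objective: alternative; same result, different data flow).

-- ===== PORT A =====
-- combined = {}; for frag_dict, n in zip(...): for element, c in frag_dict.items(): combined[element] = combined.get(element,0) + c*n
def pvTotals (fragments : List (List (String × Int))) (counts : List Int) : PySem.Dict String Int :=
  (fragments.zip counts).foldl
    (fun d fn => (PySem.Dict.ofList fn.1).items.foldl
      (fun d ec => d.insert ec.1 (d.getD ec.1 0 + ec.2 * fn.2)) d)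
    PySem.Dict.empty

def combine_fragments_py (fragments : List (List (String × Int))) (counts : List Int) : String :=
  let combined := pvTotals fragments counts
  let order := PySem.List.sorted2 combined.keys
      (fun e => if e == "C" then (0 : Int) else if e == "H" then 1 else 2) (fun e => e) false
  PySem.Str.join "" ((order.filter (fun e => decide (combined.getD e 0 > 0))).map
      (fun e => e ++ PySem.Int.toStr (combined.getD e 0)))

-- ===== PORT B =====
def combine_fragments_py_alt (fragments : List (List (String × Int))) (counts : List Int) : String :=
  -- elements = set(); for frag, _n in zip(...): elements.update(frag)
  let elements := (fragments.zip counts).foldl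
      (fun s fn => PySem.Set.update s (PySem.Dict.ofList fn.1).keys) PySem.Set.empty
  -- def total(e): return sum(frag.get(e, 0) * n for frag, n in zip(fragments, counts))
  let total : String → Int := fun e =>
    (fragments.zip counts).foldl (fun acc fn => acc + (PySem.Dict.ofList fn.1).getD e 0 * fn.2) 0
  let pieces := (["C", "H"] : List String).foldl
      (fun acc e => if total e > 0 then acc ++ [e ++ PySem.Int.toStr (total e)] else acc) []
  let pieces := (PySem.List.sorted (PySem.Set.diff elements (PySem.Set.ofList ["C", "H"])) (fun x => x) false).foldl
      (fun acc e => if total e > 0 then acc ++ [e ++ PySem.Int.toStr (total e)] else acc) pieces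
  PySem.Str.join "" pieces

-- ===== PRECONDITION & SPEC =====
def Spec_combine_fragments_py (fragments : List (List (String × Int))) (counts : List Int) (out : String) : Prop := out = combine_fragments_py_alt fragments counts
instance (fragments : List (List (String × Int))) (counts : List Int) (out : String) : Decidable (Spec_combine_fragments_py fragments counts out) := by unfold Spec_combine_fragments_py; infer_instance

-- ===== CLAIM (what is proved, stated in full; the proofs are below) =====
def Claim_equal_combine_fragments_py : Prop := ∀ (fragments : List (List (String × Int))) (counts : List Int), Dom_combine_fragments_py fragments counts → Spec_combine_fragments_py fragments counts (combine_fragments_py fragments counts)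

-- ===== LEMMAS AND PROOFS =====

-- the string key '0'/'1'/'2'-prefix that realises A's composite (tier, name) sort key
def pvSkey (e : String) : String :=
  String.ofList ((if e = "C" then '0' else if e = "H" then '1' else '2') :: e.toList)

lemma pvTotals_keys_nodup (fragments : List (List (String × Int))) (counts : List Int) :
    (pvTotals fragments counts).keys.Nodup := by
  unfold pvTotals
  generalize (fragments.zip counts) = l
  suffices h : ∀ (d : PySem.Dict String Int), d.keys.Nodup →
      (l.foldl (fun d fn => (PySem.Dict.ofList fn.1).items.foldl
        (fun d ec => d.insert ec.1 (d.getD ec.1 0 + ec.2 * fn.2)) d) d).keys.Nodup from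
    h _ PySem.Dict.nodup_keys_empty
  induction l with
  | nil => intro d hd; exact hd
  | cons x t ih =>
    intro d hd
    exact ih _ (PySem.Dict.nodup_keys_foldl_insert_key _ (fun ec : String × Int => ec.1)
      (fun (d : PySem.Dict String Int) (ec : String × Int) => d.getD ec.1 0 + ec.2 * x.2) d hd)

-- A's dict keys, accumulated over the whole nested loop, are exactly B's element set
lemma pvTotals_keys_eq_set (l : List (List (String × Int) × Int)) (d : PySem.Dict String Int) :
    (l.foldl (fun d fn => (PySem.Dict.ofList fn.1).items.foldl
        (fun d ec => d.insert ec.1 (d.getD ec.1 0 + ec.2 * fn.2)) d) d).keys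
      = l.foldl (fun s fn => PySem.Set.update s (PySem.Dict.ofList fn.1).keys) d.keys := by
  induction l generalizing d with
  | nil => rfl
  | cons x t ih =>
    simp only [List.foldl_cons]
    rw [ih]
    congr 1
    rw [PySem.Dict.keys_foldl_insert_key (PySem.Dict.ofList x.1).items (fun ec : String × Int => ec.1)
      (fun (d : PySem.Dict String Int) (ec : String × Int) => d.getD ec.1 0 + ec.2 * x.2) d]
    rfl

-- the filtered items of a nodup-key pair list at a key: empty or the unique hit
lemma pv_filter_fst_nil (ps : List (String × Int)) (e : String) (h : ∀ p ∈ ps, p.1 ≠ e) :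
    ps.filter (fun ec => ec.1 == e) = [] :=
  List.filter_eq_nil_iff.mpr (fun p hp => by simpa using h p hp)

lemma pv_filter_fst_one (ps : List (String × Int)) (e : String) (v : Int)
    (hnd : (ps.map (·.1)).Nodup) (hm : (e, v) ∈ ps) :
    ps.filter (fun ec => ec.1 == e) = [(e, v)] := by
  induction ps with
  | nil => cases hm
  | cons q t ih =>
    simp only [List.map_cons, List.nodup_cons, List.mem_map] at hnd
    rcases List.mem_cons.mp hm with hq | ht
    · subst hq
      have hnil : t.filter (fun ec => ec.1 == e) = [] := by
        refine pv_filter_fst_nil t e (fun p hp hpe => hnd.1 ⟨p, hp, hpe⟩)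
      simp [hnil]
    · have hqe : q.1 ≠ e := fun he => hnd.1 ⟨(e, v), ht, he.symm ▸ rfl⟩
      simp only [List.filter_cons, beq_iff_eq, hqe]
      exact ih hnd.2 ht

lemma pv_items_sum (w : PySem.Dict String Int) (e : String) (hnd : w.keys.Nodup) :
    ((w.items.filter (fun ec => ec.1 == e)).map (·.2)).sum = w.getD e 0 := by
  cases hg : w.get? e with
  | none =>
    have hnil : w.items.filter (fun ec => ec.1 == e) = [] := by
      refine pv_filter_fst_nil _ _ (fun p hp hpe => ?_)
      exact ((PySem.Dict.get?_eq_none_iff_not_mem_keys w e).mp hg)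
        (hpe ▸ PySem.Dict.mem_keys_of_mem_items w hp)
    rw [hnil, PySem.Dict.getD_of_get?_eq_none w 0 hg]
    rfl
  | some v =>
    have hone := pv_filter_fst_one w.items e v hnd (PySem.Dict.mem_items_of_get?_eq_some w hg)
    rw [hone, PySem.Dict.getD_eq_get?_getD, hg]
    simp

-- one fragment's inner loop adds n times the fragment's filtered value sum at each key
lemma pv_inner_getD (ps : List (String × Int)) (n : Int) (d : PySem.Dict String Int) (e : String) :
    (ps.foldl (fun d ec => d.insert ec.1 (d.getD ec.1 0 + ec.2 * n)) d).getD e 0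
      = d.getD e 0 + ((ps.filter (fun ec => ec.1 == e)).map (·.2)).sum * n := by
  induction ps generalizing d with
  | nil => simp
  | cons p t ih =>
    simp only [List.foldl_cons, List.filter_cons]
    rw [ih]
    by_cases hpe : p.1 = e
    · subst hpe
      simp only [beq_self_eq_true, if_pos, List.map_cons, List.sum_cons,
        PySem.Dict.getD_insert]
      ring
    · have hb : (p.1 == e) = false := by simpa using hpe
      simp only [hb, Bool.false_eq_true, if_false, PySem.Dict.getD_insert,
        if_neg (fun h : e = p.1 => hpe h.symm)]

-- A's accumulated total at a key is the sum over fragments of that key's value times the count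
lemma pv_outer_getD (l : List (List (String × Int) × Int)) (d : PySem.Dict String Int) (e : String) :
    (l.foldl (fun d fn => (PySem.Dict.ofList fn.1).items.foldl
        (fun d ec => d.insert ec.1 (d.getD ec.1 0 + ec.2 * fn.2)) d) d).getD e 0
      = d.getD e 0 + (l.map (fun fn => (PySem.Dict.ofList fn.1).getD e 0 * fn.2)).sum := by
  induction l generalizing d with
  | nil => simp
  | cons x t ih =>
    simp only [List.foldl_cons, List.map_cons, List.sum_cons]
    rw [ih, pv_inner_getD, pv_items_sum _ _ (PySem.Dict.nodup_keys_ofList x.1), add_assoc]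

lemma pv_skey_lt (a b : String) :
    pvSkey a < pvSkey b ↔ ((if a = "C" then '0' else if a = "H" then '1' else '2') <
      (if b = "C" then '0' else if b = "H" then '1' else '2') ∨
      ((if a = "C" then '0' else if a = "H" then '1' else '2') =
        (if b = "C" then '0' else if b = "H" then '1' else '2') ∧ a < b)) := by
  rw [pvSkey, pvSkey, String.lt_iff_toList_lt, String.toList_ofList, String.toList_ofList,
    List.cons_lt_cons_iff, ← String.lt_iff_toList_lt]

lemma pv_before_eq (a b : String) :
    ((decide ((if a == "C" then (0 : Int) else if a == "H" then 1 else 2) < (if b == "C" then (0 : Int) else if b == "H" then 1 else 2))) ||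
      (!decide ((if b == "C" then (0 : Int) else if b == "H" then 1 else 2) < (if a == "C" then (0 : Int) else if a == "H" then 1 else 2)) &&
        decide (a < b))) = decide (pvSkey a < pvSkey b) := by
  rw [Bool.eq_iff_iff]
  simp only [beq_iff_eq, Bool.or_eq_true, Bool.and_eq_true, Bool.not_eq_true', decide_eq_true_eq,
    decide_eq_false_iff_not, pv_skey_lt]
  by_cases hac : a = "C" <;> by_cases hah : a = "H" <;> by_cases hbc : b = "C" <;> by_cases hbh : b = "H" <;>
    simp_all

lemma pv_filter_beq_of_nodup (ks : List String) (a : String) (h : ks.Nodup) :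
    ks.filter (· == a) = if a ∈ ks then [a] else [] := by
  induction ks with
  | nil => simp
  | cons k t ih =>
    simp only [List.nodup_cons] at h
    by_cases hk : k = a
    · subst hk
      have hnil : List.filter (fun x => x == k) t = [] :=
        List.filter_eq_nil_iff.mpr (fun x hx => by simp only [beq_iff_eq]; rintro rfl; exact h.1 hx)
      simp [hnil]
    · simp [hk, ih h.2, List.mem_cons, Ne.symm hk]

-- A's composite-key sort of the keys equals A's sort under the single string key pvSkey
lemma pv_sorted2_eq_sorted_skey (ks : List String) :
    PySem.List.sorted2 ks (fun e => if e == "C" then (0 : Int) else if e == "H" then 1 else 2) (fun e => e) false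
      = PySem.List.sorted ks pvSkey := by
  rw [PySem.List.sorted_eq_foldl_insertBy]
  unfold PySem.List.sorted2
  simp only [Bool.false_eq_true, if_false]
  congr 1
  funext acc x
  congr 1
  funext a b
  exact pv_before_eq a b

-- the pvSkey sort of a duplicate-free key list is exactly the Hill partition
lemma pv_sorted2_hill (ks : List String) (hnd : ks.Nodup) :
    PySem.List.sorted2 ks (fun e => if e == "C" then (0 : Int) else if e == "H" then 1 else 2) (fun e => e) false
      = (if "C" ∈ ks then ["C"] else []) ++ (if "H" ∈ ks then ["H"] else [])
        ++ PySem.List.sorted (ks.filter (fun k => !(k == "C") && !(k == "H"))) (fun x => x) false := by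
  rw [pv_sorted2_eq_sorted_skey]
  apply PySem.List.sorted_eq_of_perm_of_pairwise_lt
  · -- permutation
    have hl2nd : (ks.filter (fun x => !(x == "C"))).Nodup := hnd.filter _
    have hCs : ks.filter (fun x => x == "C") = (if "C" ∈ ks then ["C"] else []) :=
      pv_filter_beq_of_nodup ks "C" hnd
    have hHs : (ks.filter (fun x => !(x == "C"))).filter (fun x => x == "H")
        = (if "H" ∈ ks then ["H"] else []) := by
      rw [pv_filter_beq_of_nodup _ "H" hl2nd]
      simp [List.mem_filter]
    have hrest : (ks.filter (fun x => !(x == "C"))).filter (fun x => !(x == "H"))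
        = ks.filter (fun k => !(k == "C") && !(k == "H")) := by
      rw [List.filter_filter]
      exact List.filter_congr (fun x _ => by rw [Bool.and_comm])
    have pS : (PySem.List.sorted (ks.filter (fun k => !(k == "C") && !(k == "H"))) (fun x => x) false).Perm
        ((ks.filter (fun x => !(x == "C"))).filter (fun x => !(x == "H"))) := by
      rw [hrest]; exact PySem.List.sorted_perm _ _ _
    rw [List.append_assoc, ← hCs, ← hHs]
    exact List.Perm.trans (List.Perm.append_left _
      (List.Perm.trans (List.Perm.append_left _ pS) (List.filter_append_perm _ _)))
      (List.filter_append_perm _ _)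
  · -- pairwise strictly increasing under pvSkey
    have hCmem : ∀ x ∈ (if "C" ∈ ks then ["C"] else ([] : List String)), x = "C" := by
      split <;> simp
    have hHmem : ∀ x ∈ (if "H" ∈ ks then ["H"] else ([] : List String)), x = "H" := by
      split <;> simp
    have hSmem : ∀ x ∈ PySem.List.sorted (ks.filter (fun k => !(k == "C") && !(k == "H"))) (fun x => x) false,
        x ≠ "C" ∧ x ≠ "H" := by
      intro x hx
      rw [PySem.List.mem_sorted, List.mem_filter] at hx
      simpa using hx.2
    have hCH : pvSkey "C" < pvSkey "H" := by
      rw [pv_skey_lt]; left; decide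
    have hCS : ∀ y : String, y ≠ "C" → y ≠ "H" → pvSkey "C" < pvSkey y := by
      intro y h1 h2
      rw [pv_skey_lt]
      simp [h1, h2]
    have hHS : ∀ y : String, y ≠ "C" → y ≠ "H" → pvSkey "H" < pvSkey y := by
      intro y h1 h2
      rw [pv_skey_lt]
      simp [h1, h2]
    rw [List.append_assoc, List.pairwise_append, List.pairwise_append]
    refine ⟨?_, ⟨?_, ?_, ?_⟩, ?_⟩
    · split <;> simp
    · split <;> simp
    · -- pairwise on the sorted rest
      have hle := PySem.List.sorted_pairwise (ks.filter (fun k => !(k == "C") && !(k == "H"))) (fun x => x)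
      have hnodupS : (PySem.List.sorted (ks.filter (fun k => !(k == "C") && !(k == "H"))) (fun x => x) false).Nodup :=
        ((PySem.List.sorted_perm _ _ _).nodup_iff).mpr (hnd.filter _)
      have hlt : (PySem.List.sorted (ks.filter (fun k => !(k == "C") && !(k == "H"))) (fun x => x) false).Pairwise
          (fun a b => a < b) := (hle.and hnodupS).imp (fun h => lt_of_le_of_ne h.1 h.2)
      refine hlt.imp_of_mem ?_
      intro a b ha hb hab
      obtain ⟨ha1, ha2⟩ := hSmem a ha
      obtain ⟨hb1, hb2⟩ := hSmem b hb
      rw [pv_skey_lt]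
      right
      simp [ha1, ha2, hb1, hb2, hab]
    · -- H block before rest
      intro a ha b hb
      rw [hHmem a ha]
      exact hHS b (hSmem b hb).1 (hSmem b hb).2
    · -- C block before H block and rest
      intro a ha b hb
      rw [hCmem a ha]
      rcases List.mem_append.mp hb with hb | hb
      · rw [hHmem b hb]; exact hCH
      · exact hCS b (hSmem b hb).1 (hSmem b hb).2

lemma pv_foldl_append_if {α β : Type} (P : α → Prop) [DecidablePred P] (f : α → β) (l : List α) (acc : List β) :
    l.foldl (fun acc x => if P x then acc ++ [f x] else acc) acc
      = acc ++ (l.filter (fun x => decide (P x))).map f := by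
  simpa using PySem.List.foldl_append_if (fun x => decide (P x)) f l acc

-- A's sorted-filter-map output equals B's staged C/H-then-rest output, over one totals dict
lemma pv_core (d : PySem.Dict String Int) (hnd : d.keys.Nodup) :
    PySem.Str.join "" (((PySem.List.sorted2 d.keys
        (fun e => if e == "C" then (0 : Int) else if e == "H" then 1 else 2) (fun e => e) false).filter
        (fun e => decide (d.getD e 0 > 0))).map (fun e => e ++ PySem.Int.toStr (d.getD e 0)))
      = PySem.Str.join "" ((PySem.List.sorted (d.keys.filter (fun k => !(k == "C") && !(k == "H"))) (fun x => x) false).foldl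
          (fun acc e => if d.getD e 0 > 0 then acc ++ [e ++ PySem.Int.toStr (d.getD e 0)] else acc)
          ((["C", "H"] : List String).foldl
            (fun acc e => if d.getD e 0 > 0 then acc ++ [e ++ PySem.Int.toStr (d.getD e 0)] else acc) [])) := by
  rw [pv_foldl_append_if, pv_foldl_append_if, pv_sorted2_hill d.keys hnd]
  have hgetD : ∀ a : String, a ∉ d.keys → d.getD a 0 = 0 := by
    intro a ha
    refine PySem.Dict.getD_of_not_contains d 0 ?_
    rw [← Bool.not_eq_true, PySem.Dict.contains_iff_mem_keys]
    exact ha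
  have hC : (if "C" ∈ d.keys then ["C"] else []).filter (fun e => decide (d.getD e 0 > 0))
      = (["C"] : List String).filter (fun e => decide (d.getD e 0 > 0)) := by
    by_cases hm : "C" ∈ d.keys
    · simp [hm]
    · simp [hm, hgetD _ hm]
  have hH : (if "H" ∈ d.keys then ["H"] else []).filter (fun e => decide (d.getD e 0 > 0))
      = (["H"] : List String).filter (fun e => decide (d.getD e 0 > 0)) := by
    by_cases hm : "H" ∈ d.keys
    · simp [hm]
    · simp [hm, hgetD _ hm]
  have hsplit : (["C", "H"] : List String).filter (fun e => decide (d.getD e 0 > 0))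
      = (["C"] : List String).filter (fun e => decide (d.getD e 0 > 0))
        ++ (["H"] : List String).filter (fun e => decide (d.getD e 0 > 0)) := by
    simp only [List.filter_cons, List.filter_nil, decide_eq_true_eq, gt_iff_lt]
    split_ifs <;> simp
  rw [hsplit]
  simp only [List.filter_append, List.map_append, List.nil_append, hC, hH]

theorem combine_fragments_py_spec : Claim_equal_combine_fragments_py := by
  intro fragments counts _hdom
  unfold Spec_combine_fragments_py combine_fragments_py combine_fragments_py_alt
  have htot : ∀ e : String,
      (fragments.zip counts).foldl (fun acc fn => acc + (PySem.Dict.ofList fn.1).getD e 0 * fn.2) 0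
        = (pvTotals fragments counts).getD e 0 := by
    intro e
    rw [PySem.List.foldl_add, pvTotals, pv_outer_getD]
    simp [PySem.Dict.getD_empty]
  have hkeys : (fragments.zip counts).foldl
      (fun s fn => PySem.Set.update s (PySem.Dict.ofList fn.1).keys) PySem.Set.empty
        = (pvTotals fragments counts).keys := by
    rw [pvTotals, pvTotals_keys_eq_set]
    rfl
  have hdiff : PySem.Set.diff (pvTotals fragments counts).keys (PySem.Set.ofList ["C", "H"])
      = (pvTotals fragments counts).keys.filter (fun k => !(k == "C") && !(k == "H")) := by
    unfold PySem.Set.diff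
    refine List.filter_congr (fun x _ => ?_)
    show (!PySem.Set.contains (PySem.Set.ofList ["C", "H"]) x) = (!(x == "C") && !(x == "H"))
    have hof : PySem.Set.ofList (["C", "H"] : List String) = ["C", "H"] := by decide
    rw [hof]
    simp only [PySem.Set.contains, List.contains_cons, List.contains_nil, Bool.or_false,
      Bool.not_or]
  simp only [htot, hkeys, hdiff]
  exact pv_core (pvTotals fragments counts) (pvTotals_keys_nodup fragments counts)
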